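-- pv_equiv track=rewrite | github.com/redavoeigor/task-tracker-cli-solution | utils.py | delete_tasks_by_group
-- ===== SOURCE A (Python) =====
-- def delete_tasks_by_group(task_list, group_name):
--     """Deletes tasks by group name."""
--     deleted = False
--     updated_task_list = []
--     for task in task_list:
--         if task["group"] == group_name:
--             deleted = True
--         else:
--             updated_task_list.append(task)
--     return updated_task_list, deleted
-- ===== SOURCE B (Python) =====
-- def delete_tasks_by_group(task_list, group_name):
--     """Deletes tasks by group name."""
--     updated_task_list = [t for t in task_list if t["group"] != group_name]
--     deleted = any(t["group"] == group_name for t in task_list)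
--     return updated_task_list, deleted
-- ===== Notes on version B (the rewrite author's own statement) =====
-- stated objective: idiomatic
-- what changed: Replaces the single fused loop carrying two pieces of state (a flag mutated in a branch and a list built by append) with two independent passes: a filter comprehension for the surviving tasks and a separate any() scan for the deletion flag.
import Mathlib
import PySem

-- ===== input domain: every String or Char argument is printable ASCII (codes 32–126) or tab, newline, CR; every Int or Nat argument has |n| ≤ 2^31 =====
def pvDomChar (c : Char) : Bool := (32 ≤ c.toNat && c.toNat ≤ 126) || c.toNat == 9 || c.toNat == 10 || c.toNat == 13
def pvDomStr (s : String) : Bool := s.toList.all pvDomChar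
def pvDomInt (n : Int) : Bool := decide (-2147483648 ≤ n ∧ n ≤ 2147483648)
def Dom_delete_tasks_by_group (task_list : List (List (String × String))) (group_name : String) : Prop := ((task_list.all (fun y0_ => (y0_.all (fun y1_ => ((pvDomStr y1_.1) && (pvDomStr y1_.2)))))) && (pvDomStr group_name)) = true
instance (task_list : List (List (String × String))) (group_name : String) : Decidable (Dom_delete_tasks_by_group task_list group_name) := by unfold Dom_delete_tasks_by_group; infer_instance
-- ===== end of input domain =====

-- B splits A's single fused loop (flag + list built together) into two independent passes
-- (filter for the survivors, any() for the flag); same O(n) cost, plainer shape.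
-- Pre_ excludes inputs where some task lacks the "group" key, on which both A and B raise KeyError.


-- ===== PORT A =====
-- task["group"] : first-match lookup of key "group" (KeyError → none, excluded by Pre_)
def pvGroup (task : List (String × String)) : Option String :=
  (PySem.Dict.mk task).get? "group"

def delete_tasks_by_group (task_list : List (List (String × String))) (group_name : String) : (List (List (String × String))) × Bool :=
  let st := task_list.foldl
    (fun (s : List (List (String × String)) × Bool) task =>
      if pvGroup task = some group_name then (s.1, true)
      else (s.1 ++ [task], s.2))
    ([], false)
  (st.1, st.2)

-- ===== PORT B =====
def delete_tasks_by_group_alt (task_list : List (List (String × String))) (group_name : String) : (List (List (String × String))) × Bool :=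
  (task_list.filter (fun task => !(pvGroup task == some group_name)),
   task_list.any (fun task => pvGroup task == some group_name))

-- ===== PRECONDITION & SPEC =====
-- Pre_ excludes exactly the inputs where some task has no "group" key: Python A raises KeyError there (and B does too).
def Pre_delete_tasks_by_group (task_list : List (List (String × String))) (group_name : String) : Prop :=
  ∀ task ∈ task_list, (PySem.Dict.mk task).contains "group" = true
instance (task_list : List (List (String × String))) (group_name : String) : Decidable (Pre_delete_tasks_by_group task_list group_name) := by unfold Pre_delete_tasks_by_group; infer_instance

def pvWitness_delete_tasks_by_group : (List (List (String × String))) × String :=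
  ([[("group", "g"), ("name", "a")], [("group", "h")]], "g")

def Spec_delete_tasks_by_group (task_list : List (List (String × String))) (group_name : String) (out : (List (List (String × String))) × Bool) : Prop := out = delete_tasks_by_group_alt task_list group_name
instance (task_list : List (List (String × String))) (group_name : String) (out : (List (List (String × String))) × Bool) : Decidable (Spec_delete_tasks_by_group task_list group_name out) := by unfold Spec_delete_tasks_by_group; infer_instance

-- ===== CLAIM (what is proved, stated in full; the proofs are below) =====
def Claim_equal_delete_tasks_by_group : Prop := ∀ (task_list : List (List (String × String))) (group_name : String), Dom_delete_tasks_by_group task_list group_name → Pre_delete_tasks_by_group task_list group_name → Spec_delete_tasks_by_group task_list group_name (delete_tasks_by_group task_list group_name)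

-- ===== LEMMAS AND PROOFS =====
theorem pv_loop (gn : String) (l : List (List (String × String)))
    (acc : List (List (String × String))) (d : Bool) :
    l.foldl
      (fun (s : List (List (String × String)) × Bool) task =>
        if pvGroup task = some gn then (s.1, true)
        else (s.1 ++ [task], s.2))
      (acc, d)
    = (acc ++ l.filter (fun task => !(pvGroup task == some gn)),
       d || l.any (fun task => pvGroup task == some gn)) := by
  induction l generalizing acc d with
  | nil => simp
  | cons t ts ih =>
    by_cases h : pvGroup t = some gn
    · simp [List.foldl_cons, h, ih]
    · have hf : (pvGroup t == some gn) = false := by simp [h]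
      simp [List.foldl_cons, h, hf, ih]

-- ===== VERDICT (by name: the statement is the Claim_ definition above) =====
theorem delete_tasks_by_group_spec : Claim_equal_delete_tasks_by_group := by
  intro tl gn _ _
  unfold Spec_delete_tasks_by_group delete_tasks_by_group delete_tasks_by_group_alt
  simp [pv_loop]
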